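-- pv_equiv track=rewrite | github.com/danielreis1/SearchTool | olxSearchTool/volantesic_find_all_brands_and_models.py | filter_buttons
-- ===== SOURCE A (Python) =====
-- def filter_buttons(buttons):
--     """
--     from all the buttons chooses the buttons with the highest similarity score
--     :param buttons: input buttons, alongside scores key: button, val: score
--     :return: max_score, list with all buttons with max_score as key
--     """
--     max_score = 0
--     max_score_buttons = []
--     for i in buttons:
--         if buttons[i] > max_score:
--             max_score = buttons[i]
--     # max_score minium value might need some twerking
--     if max_score < 30:
--         raise MaxScoreTooLowForEvaluation(max_score)
--     for i in buttons:
--         if buttons[i] == max_score: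
--             max_score_buttons += [i]
--
--     return max_score, max_score_buttons
-- ===== SOURCE B (Python) =====
-- class MaxScoreTooLowForEvaluation(Exception):
--     pass
--
--
-- def filter_buttons(buttons):
--     """Single pass over the items: track the running max and reset the
--     list of best buttons whenever a new max appears."""
--     max_score = 0
--     max_score_buttons = []
--     for button, score in buttons.items():
--         if score > max_score:
--             max_score = score
--             max_score_buttons = [button]
--         elif score == max_score:
--             max_score_buttons.append(button)
--     if max_score < 30:
--         raise MaxScoreTooLowForEvaluation(max_score)
--     return max_score, max_score_buttons
-- ===== Notes on version B (the rewrite author's own statement) =====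
-- stated objective: simpler
-- what changed: Replaces A's two full scans (one to find the max via repeated dict lookups, one to collect the argmax keys) with a single pass over the items that resets the collected list whenever a new maximum appears.
import Mathlib
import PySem

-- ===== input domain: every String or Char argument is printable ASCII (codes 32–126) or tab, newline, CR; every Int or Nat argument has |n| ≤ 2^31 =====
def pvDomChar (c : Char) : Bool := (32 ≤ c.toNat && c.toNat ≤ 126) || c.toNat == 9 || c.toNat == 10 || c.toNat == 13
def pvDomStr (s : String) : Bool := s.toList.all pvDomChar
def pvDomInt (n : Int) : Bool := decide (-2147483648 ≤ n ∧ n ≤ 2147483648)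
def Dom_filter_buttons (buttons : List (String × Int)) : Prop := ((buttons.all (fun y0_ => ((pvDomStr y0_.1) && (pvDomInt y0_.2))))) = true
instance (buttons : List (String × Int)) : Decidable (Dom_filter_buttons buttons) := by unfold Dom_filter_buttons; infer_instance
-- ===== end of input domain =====

-- B changes A's two scans (max pass + collect pass, each looking values up by key)
-- into one pass over the items with reset-on-new-max; objective: simpler.
-- Both sides view the input association list as the Python dict it denotes (last value wins).

-- ===== PORT A =====
def filter_buttons (buttons : List (String × Int)) : Int × List String :=
  let d := PySem.Dict.ofList buttons
  let max_score : Int :=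
    d.keys.foldl (fun m i => if d.getD i 0 > m then d.getD i 0 else m) 0
  -- Python raises MaxScoreTooLowForEvaluation when max_score < 30: excluded by Pre_.
  let max_score_buttons : List String :=
    d.keys.foldl (fun acc i => if d.getD i 0 == max_score then acc ++ [i] else acc) []
  (max_score, max_score_buttons)

-- ===== PORT B =====
def filter_buttons_alt (buttons : List (String × Int)) : Int × List String :=
  (PySem.Dict.ofList buttons).items.foldl
    (fun s p =>
      if p.2 > s.1 then (p.2, [p.1])
      else if p.2 == s.1 then (s.1, s.2 ++ [p.1])
      else s)
    (0, [])

-- ===== PRECONDITION & SPEC =====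
-- Pre_ excludes exactly the inputs where the Python A raises: dicts whose maximum
-- value (floored at 0) is below 30, i.e. no stored value of the dict reaches 30.
def Pre_filter_buttons (buttons : List (String × Int)) : Prop :=
  ∃ p ∈ (PySem.Dict.ofList buttons).items, 30 ≤ p.2
instance (buttons : List (String × Int)) : Decidable (Pre_filter_buttons buttons) := by
  unfold Pre_filter_buttons; infer_instance
def pvWitness_filter_buttons : (List (String × Int)) := [("a", 31), ("b", 7), ("c", 31)]

def Spec_filter_buttons (buttons : List (String × Int)) (out : Int × List String) : Prop := out = filter_buttons_alt buttons
instance (buttons : List (String × Int)) (out : Int × List String) : Decidable (Spec_filter_buttons buttons out) := by unfold Spec_filter_buttons; infer_instance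

-- ===== CLAIM (what is proved, stated in full; the proofs are below) =====
def Claim_equal_filter_buttons : Prop := ∀ (buttons : List (String × Int)), Dom_filter_buttons buttons → Pre_filter_buttons buttons → Spec_filter_buttons buttons (filter_buttons buttons)

-- ===== LEMMAS AND PROOFS =====

-- running max in A's if-form
def pvMaxf (l : List (String × Int)) (m : Int) : Int :=
  l.foldl (fun a p => if p.2 > a then p.2 else a) m

theorem pvMaxf_cons (p : String × Int) (t : List (String × Int)) (m : Int) :
    pvMaxf (p :: t) m = pvMaxf t (if p.2 > m then p.2 else m) := rfl

theorem le_pvMaxf (l : List (String × Int)) (m : Int) : m ≤ pvMaxf l m := by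
  induction l generalizing m with
  | nil => simp [pvMaxf]
  | cons p t ih =>
    rw [pvMaxf_cons]
    by_cases h : p.2 > m
    · rw [if_pos h]
      have := ih p.2
      omega
    · rw [if_neg h]
      exact ih m

-- B's single pass computes (running max, keys achieving it)
theorem pvAlt_fold (l : List (String × Int)) (m : Int) (acc : List String) :
    l.foldl
      (fun s p =>
        if p.2 > s.1 then (p.2, [p.1])
        else if p.2 == s.1 then (s.1, s.2 ++ [p.1])
        else s)
      (m, acc)
    = (pvMaxf l m,
       (if pvMaxf l m = m then acc else []) ++
         (l.filter (fun p => p.2 == pvMaxf l m)).map Prod.fst) := by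
  induction l generalizing m acc with
  | nil => simp [pvMaxf]
  | cons p t ih =>
    rw [List.foldl_cons, pvMaxf_cons]
    by_cases h1 : p.2 > m
    · rw [if_pos h1, if_pos h1, ih]
      have hle := le_pvMaxf t p.2
      rw [if_neg (by omega : ¬ pvMaxf t p.2 = m), List.filter_cons]
      by_cases h2 : pvMaxf t p.2 = p.2
      · simp [h2]
      · have hb : (p.2 == pvMaxf t p.2) = false := by
          simp only [beq_eq_false_iff_ne]; omega
        simp [hb, h2]
    · rw [if_neg h1, if_neg h1]
      have hle := le_pvMaxf t m
      by_cases h2 : p.2 = m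
      · have hb : (p.2 == m) = true := by simp [h2]
        rw [hb, if_pos rfl, ih, List.filter_cons]
        by_cases h3 : pvMaxf t m = m
        · rw [show p.2 = m from h2]
          simp [h3]
        · have hb2 : (p.2 == pvMaxf t m) = false := by
            simp only [beq_eq_false_iff_ne]; omega
          simp [h3, hb2]
      · have hb : (p.2 == m) = false := by simp [h2]
        rw [hb]
        simp only [Bool.false_eq_true, if_false]
        rw [ih, List.filter_cons]
        have hb2 : (p.2 == pvMaxf t m) = false := by
          simp only [beq_eq_false_iff_ne]; omega
        simp [hb2]

-- A's lookups over d.keys are the items' own values (keys of a Dict are unique)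
theorem pvA_eq (buttons : List (String × Int)) :
    filter_buttons buttons =
      (pvMaxf (PySem.Dict.ofList buttons).items 0,
       ((PySem.Dict.ofList buttons).items.filter
          (fun p => p.2 == pvMaxf (PySem.Dict.ofList buttons).items 0)).map Prod.fst) := by
  simp only [filter_buttons]
  set d := PySem.Dict.ofList buttons with hd
  have hnd : d.keys.Nodup := PySem.Dict.nodup_keys_ofList buttons
  have hkeys : d.keys = d.items.map Prod.fst := rfl
  have hget : ∀ p ∈ d.items, ∀ d0 : Int, d.getD p.1 d0 = p.2 := by
    intro p hp d0
    exact PySem.Dict.getD_of_mem_items d (by simpa using hp) hnd d0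
  have hmax :
      d.keys.foldl (fun m i => if d.getD i 0 > m then d.getD i 0 else m) 0
        = pvMaxf d.items 0 := by
    rw [hkeys, List.foldl_map]
    exact PySem.List.foldl_congr_mem' _ _ _ 0 (fun p hp acc => by rw [hget p hp])
  rw [hmax]
  congr 1
  rw [hkeys, List.foldl_map]
  rw [PySem.List.foldl_congr_mem' _ _
        (fun (acc : List String) (p : String × Int) =>
          if p.2 == pvMaxf d.items 0 then acc ++ [p.1] else acc) []
        (fun p hp acc => by rw [hget p hp])]
  rw [PySem.List.foldl_append_if (fun p => p.2 == pvMaxf d.items 0) Prod.fst d.items []]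
  simp

-- ===== VERDICT (by name: the statement is the Claim_ definition above) =====
theorem filter_buttons_spec : Claim_equal_filter_buttons := by
  intro buttons _ _
  unfold Spec_filter_buttons filter_buttons_alt
  rw [pvA_eq, pvAlt_fold]
  simp
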